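-- pv_equiv track=rewrite | github.com/skribblez2718/bonfire | bonfire/utils/decorate.py | make_wide_space_all
-- ===== SOURCE A (Python) =====
-- def make_wide_space_all(text: str) -> str:
--     """
--     Add spaces between all characters (vaporwave aesthetic).
--
--     Args:
--         text: Input text to modify
--
--     Returns:
--         str: Text with spaces added between all characters
--     """
--     result = []
--
--     # Process each character
--     for i, char in enumerate(text):
--         # Skip existing whitespace characters
--         if char.isspace():
--             result.append(char)
--             continue
--
--         # Add the character
--         result.append(char)
--
--         # Add a space after the character if it's not the last character
--         # and the next character isn't whitespace
--         if i < len(text) - 1 and not text[i + 1].isspace():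
--             result.append(" ")
--
--     return "".join(result)
-- ===== SOURCE B (Python) =====
-- def make_wide_space_all(text: str) -> str:
--     """Run-based: split the text into maximal runs of non-whitespace characters,
--     join each run's characters with single spaces, and keep whitespace as-is."""
--     pieces = []
--     i, n = 0, len(text)
--     while i < n:
--         if text[i].isspace():
--             pieces.append(text[i])
--             i += 1
--         else:
--             j = i + 1
--             while j < n and not text[j].isspace():
--                 j += 1
--             pieces.append(" ".join(text[i:j]))
--             i = j
--     return "".join(pieces)
-- ===== Notes on version B (the rewrite author's own statement) =====
-- stated objective: alternative
-- what changed: Instead of A's per-character loop that looks ahead one index to decide whether to emit a space, B scans the text run by run: whitespace characters pass through unchanged, and each maximal run of non-whitespace characters is located with an inner scan and emitted with its characters joined by single spaces.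
import Mathlib
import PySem

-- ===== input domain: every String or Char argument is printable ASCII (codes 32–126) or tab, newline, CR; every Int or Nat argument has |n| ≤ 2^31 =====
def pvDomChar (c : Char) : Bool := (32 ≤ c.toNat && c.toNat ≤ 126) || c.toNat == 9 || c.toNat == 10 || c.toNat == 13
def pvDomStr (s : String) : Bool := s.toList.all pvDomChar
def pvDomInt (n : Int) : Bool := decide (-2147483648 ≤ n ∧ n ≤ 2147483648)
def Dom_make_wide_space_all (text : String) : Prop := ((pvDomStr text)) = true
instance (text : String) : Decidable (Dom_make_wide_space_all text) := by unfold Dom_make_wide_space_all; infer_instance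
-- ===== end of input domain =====

-- B replaces A's per-character lookahead loop with a run-based scan (maximal non-whitespace
-- runs joined with spaces); same O(n) output, different traversal.

-- ===== PORT A =====
-- index loop over enumerate(text), looking ahead at text[i+1]
def make_wide_space_all (text : String) : String :=
  let cs := text.toList
  let result := (PySem.List.enumerate cs 0).foldl (fun acc p =>
    if PySem.Chars.isspace p.2 then acc ++ [p.2]
    else
      let acc := acc ++ [p.2]
      if p.1 < (cs.length : Int) - 1 ∧ PySem.Chars.isspace (PySem.List.pyGetD cs (p.1 + 1) ' ') = false
      then acc ++ [' '] else acc) []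
  String.ofList result

-- ===== PORT B =====
-- run scanner: a whitespace char passes through; otherwise the inner scan (takeWhile/dropWhile
-- = B's j-loop locating the end of the run) takes the maximal non-whitespace run, which is
-- emitted as " ".join(run) (= intersperse ' '), and scanning resumes after the run.
def altGo : List Char → List Char
  | [] => []
  | c :: t =>
    if PySem.Chars.isspace c then c :: altGo t
    else
      (List.intersperse ' ' (c :: t.takeWhile (fun d => !PySem.Chars.isspace d))) ++
        altGo (t.dropWhile (fun d => !PySem.Chars.isspace d))
termination_by cs => cs.length
decreasing_by
  all_goals simp only [List.length_cons]
  all_goals first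
    | omega
    | exact Nat.lt_succ_of_le (List.length_dropWhile_le _ _)

def make_wide_space_all_alt (text : String) : String :=
  String.ofList (altGo text.toList)

-- ===== PRECONDITION & SPEC =====
def Spec_make_wide_space_all (text : String) (out : String) : Prop := out = make_wide_space_all_alt text
instance (text : String) (out : String) : Decidable (Spec_make_wide_space_all text out) := by unfold Spec_make_wide_space_all; infer_instance

-- ===== CLAIM (what is proved, stated in full; the proofs are below) =====
def Claim_equal_make_wide_space_all : Prop := ∀ (text : String), Dom_make_wide_space_all text → Spec_make_wide_space_all text (make_wide_space_all text)

-- ===== LEMMAS AND PROOFS =====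

-- common pairwise specification of the output
def wideSpec : List Char → List Char
  | [] => []
  | [c] => [c]
  | a :: b :: t =>
      a :: ((if PySem.Chars.isspace a = false ∧ PySem.Chars.isspace b = false then [' '] else []) ++ wideSpec (b :: t))

-- A's fold body, named for the loop lemma
def fA (cs : List Char) (acc : List Char) (p : Int × Char) : List Char :=
  if PySem.Chars.isspace p.2 then acc ++ [p.2]
  else
    let acc := acc ++ [p.2]
    if p.1 < (cs.length : Int) - 1 ∧ PySem.Chars.isspace (PySem.List.pyGetD cs (p.1 + 1) ' ') = false
    then acc ++ [' '] else acc

theorem a_loop (cs : List Char) : ∀ (rest : List Char) (s : Nat), cs.drop s = rest →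
    ∀ acc : List Char, (PySem.List.enumerate rest (s : Int)).foldl (fA cs) acc = acc ++ wideSpec rest := by
  intro rest
  induction rest with
  | nil => intro s _ acc; simp [PySem.List.enumerate_nil, wideSpec]
  | cons a t ih =>
    intro s hs acc
    have hslen : s + (a :: t).length = cs.length := by
      have h := congrArg List.length hs
      rw [List.length_drop] at h
      simp only [List.length_cons] at h ⊢
      omega
    rw [PySem.List.enumerate_cons, List.foldl_cons]
    have hdrop1 : cs.drop (s + 1) = t := by
      have : (cs.drop s).drop 1 = cs.drop (s + 1) := by
        rw [List.drop_drop]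
      rw [← this, hs]
      simp
    cases t with
    | nil =>
      -- last character: the index test s < len - 1 fails
      have hlt : ¬ ((s : Int) < (cs.length : Int) - 1) := by
        simp at hslen; omega
      unfold fA
      rcases h1 : PySem.Chars.isspace a with _ | _ <;>
        simp [PySem.List.enumerate_nil, wideSpec, hlt]
    | cons b t' =>
      have hlt : (s : Int) < (cs.length : Int) - 1 := by
        simp at hslen; omega
      have hget : PySem.List.pyGetD cs ((s : Int) + 1) ' ' = b := by
        have hcast : ((s : Int) + 1) = ((s + 1 : Nat) : Int) := by push_cast; ring
        rw [hcast, PySem.List.pyGetD_natCast]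
        have : cs[s+1]? = some b := by
          rw [← List.head?_drop, hdrop1]; rfl
        simp [List.getD, this]
      have hstep : fA cs acc ((s : Int), a)
          = acc ++ ([a] ++ (if PySem.Chars.isspace a = false ∧ PySem.Chars.isspace b = false then [' '] else [])) := by
        unfold fA
        rcases h1 : PySem.Chars.isspace a <;> rcases h2 : PySem.Chars.isspace b <;>
          simp [hget, hlt, h2]
      have hcast1 : ((s : Int) + 1) = ((s + 1 : Nat) : Int) := by push_cast; ring
      rw [hstep, hcast1, ih (s + 1) hdrop1, wideSpec]
      simp

-- B's run scanner meets the same pairwise specification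
theorem altGo_eq (cs : List Char) : altGo cs = wideSpec cs := by
  induction cs with
  | nil => rw [altGo.eq_def, wideSpec]
  | cons a t ih =>
    cases t with
    | nil =>
      rcases h : PySem.Chars.isspace a <;> simp [altGo.eq_def, wideSpec, h]
    | cons b t' =>
      rcases ha : PySem.Chars.isspace a with _ | _
      · -- a is non-whitespace
        rw [altGo.eq_def]
        simp only [ha, Bool.false_eq_true, if_false, List.takeWhile_cons, List.dropWhile_cons]
        rcases hb : PySem.Chars.isspace b with _ | _
        · -- b non-whitespace too: the run continues across a and b
          simp only [Bool.not_false, if_true]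
          rw [altGo.eq_def] at ih
          simp only [hb, Bool.false_eq_true, if_false] at ih
          rw [wideSpec, if_pos ⟨ha, hb⟩, ← ih]
          simp
        · -- b whitespace: the run is just [a]
          simp only [Bool.not_true, Bool.false_eq_true, if_false]
          rw [wideSpec, if_neg (by simp [hb]), ih]
          simp
      · -- a whitespace: passes through
        rw [altGo.eq_def]
        simp only [ha, if_true]
        rw [ih, wideSpec, if_neg (by simp [ha])]
        simp

-- ===== VERDICT (by name: the statement is the Claim_ definition above) =====
theorem make_wide_space_all_spec : Claim_equal_make_wide_space_all := by
  intro text _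
  unfold Spec_make_wide_space_all make_wide_space_all make_wide_space_all_alt
  simp only []
  congr 1
  rw [altGo_eq]
  exact a_loop text.toList text.toList 0 rfl []
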